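-- pv_equiv track=rewrite | github.com/marikie/oikopleura | analysis/triSbstTSV.py | isSbst
-- ===== SOURCE A (Python) =====
-- def isSbst(g1Tri, g2Tri, g3Tri):
--     """
--     If the substitution happened only on genome2, return True.
--     If the substitution happened only on genome3, return True.
--     Otherwise, return False.
--     """
--     assert (g1Tri[0] == g2Tri[0] and g2Tri[0] == g3Tri[0]) and (
--         g1Tri[2] == g2Tri[2] and g2Tri[2] == g3Tri[2]
--     ), "edge bases are not the same (not a mutational signature)"
--
--     middleList = [g1Tri[1], g2Tri[1], g3Tri[1]]
--     minority = ""
--     if len(set(middleList)) == 2: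
--         for base in set(middleList):
--             if middleList.count(base) == 1:
--                 minority = base
--         if g2Tri[1] == minority or g3Tri[1] == minority:
--             return True
--         else:
--             return False
--     else:
--         return False
-- ===== SOURCE B (Python) =====
-- def isSbst(g1Tri, g2Tri, g3Tri):
--     """
--     If the substitution happened only on genome2, return True.
--     If the substitution happened only on genome3, return True.
--     Otherwise, return False.
--     """
--     assert (g1Tri[0] == g2Tri[0] and g2Tri[0] == g3Tri[0]) and (
--         g1Tri[2] == g2Tri[2] and g2Tri[2] == g3Tri[2]
--     ), "edge bases are not the same (not a mutational signature)"
--     m1, m2, m3 = g1Tri[1], g2Tri[1], g3Tri[1]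
--     return (m1 == m3 and m2 != m1) or (m1 == m2 and m3 != m1)
-- ===== Notes on version B (the rewrite author's own statement) =====
-- stated objective: simpler
-- what changed: Replaces the build-a-set-then-scan-for-the-count-1-minority strategy with three direct pairwise comparisons of the middle bases: g2-or-g3 is the odd one out iff (m1==m3 and m2!=m1) or (m1==m2 and m3!=m1).
import Mathlib
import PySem

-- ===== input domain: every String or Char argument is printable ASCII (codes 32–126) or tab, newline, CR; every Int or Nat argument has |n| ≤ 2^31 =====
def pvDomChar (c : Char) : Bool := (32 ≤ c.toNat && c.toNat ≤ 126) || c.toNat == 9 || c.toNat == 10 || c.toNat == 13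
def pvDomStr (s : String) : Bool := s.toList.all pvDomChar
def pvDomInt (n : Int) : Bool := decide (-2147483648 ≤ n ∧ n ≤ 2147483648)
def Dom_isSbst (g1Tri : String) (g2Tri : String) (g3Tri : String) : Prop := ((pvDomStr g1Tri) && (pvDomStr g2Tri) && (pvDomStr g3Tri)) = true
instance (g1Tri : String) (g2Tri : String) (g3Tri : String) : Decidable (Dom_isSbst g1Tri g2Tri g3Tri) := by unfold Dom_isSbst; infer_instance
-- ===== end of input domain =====

-- B replaces A's set-construction + count-1 minority scan with three direct pairwise
-- comparisons of the middle bases (same result; not faster, just plainer).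


-- ===== PORT A =====
-- The assert (edge bases equal) raises AssertionError where it fails; those inputs are
-- outside Pre_, so the port elides it.  minority starts as the Python string "" which a
-- 1-char middle base can never equal: ported as 'none' (Option Char).
def isSbst (g1Tri : String) (g2Tri : String) (g3Tri : String) : Bool :=
  match PySem.Str.pyGet? g1Tri 1, PySem.Str.pyGet? g2Tri 1, PySem.Str.pyGet? g3Tri 1 with
  | some a, some b, some c =>
    let middleList := [a, b, c]
    let s := PySem.Set.ofList middleList
    if PySem.Set.len s == 2 then
      let minority : Option Char :=
        s.foldl (fun acc base =>
          if PySem.List.count middleList base == 1 then some base else acc) none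
      if some b == minority || some c == minority then true else false
    else
      false
  | _, _, _ => false  -- IndexError in Python; outside Pre_

-- ===== PORT B =====
def isSbst_alt (g1Tri : String) (g2Tri : String) (g3Tri : String) : Bool :=
  -- IndexError in Python (outside Pre_) when any middle base is missing
  match PySem.Str.pyGet? g1Tri 1 with
  | none => false
  | some m1 =>
    match PySem.Str.pyGet? g2Tri 1 with
    | none => false
    | some m2 =>
      match PySem.Str.pyGet? g3Tri 1 with
      | none => false
      | some m3 => (m1 == m3 && m2 != m1) || (m1 == m2 && m3 != m1)

-- ===== PRECONDITION & SPEC =====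
-- A indexes positions 0,1,2 of each triplet (IndexError below length 3) and asserts the
-- edge bases agree (AssertionError otherwise); Pre_ is exactly those inputs.
def Pre_isSbst (g1Tri : String) (g2Tri : String) (g3Tri : String) : Prop :=
  3 ≤ g1Tri.toList.length ∧ 3 ≤ g2Tri.toList.length ∧ 3 ≤ g3Tri.toList.length ∧
  g1Tri.toList[0]? = g2Tri.toList[0]? ∧ g2Tri.toList[0]? = g3Tri.toList[0]? ∧
  g1Tri.toList[2]? = g2Tri.toList[2]? ∧ g2Tri.toList[2]? = g3Tri.toList[2]?
instance (g1Tri : String) (g2Tri : String) (g3Tri : String) : Decidable (Pre_isSbst g1Tri g2Tri g3Tri) := by unfold Pre_isSbst; infer_instance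

def pvWitness_isSbst : String × String × String := ("ACG", "ATG", "ACG")

def Spec_isSbst (g1Tri : String) (g2Tri : String) (g3Tri : String) (out : Bool) : Prop := out = isSbst_alt g1Tri g2Tri g3Tri
instance (g1Tri : String) (g2Tri : String) (g3Tri : String) (out : Bool) : Decidable (Spec_isSbst g1Tri g2Tri g3Tri out) := by unfold Spec_isSbst; infer_instance

-- ===== CLAIM (what is proved, stated in full; the proofs are below) =====
def Claim_equal_isSbst : Prop := ∀ (g1Tri : String) (g2Tri : String) (g3Tri : String), Dom_isSbst g1Tri g2Tri g3Tri → Pre_isSbst g1Tri g2Tri g3Tri → Spec_isSbst g1Tri g2Tri g3Tri (isSbst g1Tri g2Tri g3Tri)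

-- ===== LEMMAS AND PROOFS =====
-- The core fact on three middle bases: A's set/minority computation agrees with B's
-- pairwise comparisons, by cases on which of a, b, c coincide.
theorem core_eq (a b c : Char) :
    (let middleList := [a, b, c]
     let s := PySem.Set.ofList middleList
     if PySem.Set.len s == 2 then
       let minority : Option Char :=
         s.foldl (fun acc base =>
           if PySem.List.count middleList base == 1 then some base else acc) none
       if some b == minority || some c == minority then true else false
     else false)
    = ((a == c && b != a) || (a == b && c != a)) := by
  by_cases hab : a = b <;> by_cases hbc : b = c <;> by_cases hac : a = c <;>
    simp_all [PySem.Set.ofList, PySem.Set.add, PySem.Set.contains, PySem.Set.len,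
      PySem.List.count, List.count_cons, List.foldl] <;>
    simp_all [beq_iff_eq, Ne.symm]

theorem isSbst_spec : Claim_equal_isSbst := by
  intro g1 g2 g3 _ hpre
  obtain ⟨h1, h2, h3, -⟩ := hpre
  unfold Spec_isSbst isSbst isSbst_alt
  have e1 : PySem.Str.pyGet? g1 1 = g1.toList[1]? := by
    simpa using PySem.Str.pyGet?_natCast g1 1
  have e2 : PySem.Str.pyGet? g2 1 = g2.toList[1]? := by
    simpa using PySem.Str.pyGet?_natCast g2 1
  have e3 : PySem.Str.pyGet? g3 1 = g3.toList[1]? := by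
    simpa using PySem.Str.pyGet?_natCast g3 1
  obtain ⟨a, ha⟩ : ∃ x, g1.toList[1]? = some x :=
    ⟨g1.toList[1]'(by omega), List.getElem?_eq_getElem (by omega)⟩
  obtain ⟨b, hb⟩ : ∃ x, g2.toList[1]? = some x :=
    ⟨g2.toList[1]'(by omega), List.getElem?_eq_getElem (by omega)⟩
  obtain ⟨c, hc⟩ : ∃ x, g3.toList[1]? = some x :=
    ⟨g3.toList[1]'(by omega), List.getElem?_eq_getElem (by omega)⟩
  rw [e1, e2, e3, ha, hb, hc]
  exact core_eq a b c
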